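-- pv_equiv track=rewrite | github.com/martinstaebler/codewars | Smallest_Permutation.py | min_permutation
-- ===== SOURCE A (Python) =====
-- def min_permutation(n):
--     sorted_array = sorted([int(x) for x in str(abs(n))])
--     for number in range(0, len(sorted_array)):
--         if sorted_array[number] > 0:
--            sorted_array.insert(0, sorted_array.pop(number))
--            break
--     sorted_number = "".join([ str(x) for x in sorted_array])
--     return int("-" + sorted_number) if n < 0 else int(sorted_number)
-- ===== SOURCE B (Python) =====
-- def min_permutation(n):
--     ds = [int(c) for c in str(abs(n))]
--     lead = min((d for d in ds if d > 0), default=0)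
--     if lead == 0:
--         return 0
--     out = [lead] + [0] * ds.count(0)
--     for d in range(1, 10):
--         out += [d] * (ds.count(d) - (d == lead))
--     body = "".join(str(x) for x in out)
--     return int("-" + body) if n < 0 else int(body)
-- ===== Notes on version B (the rewrite author's own statement) =====
-- stated objective: alternative
-- what changed: A sorts the digit list and then scans it for the first positive digit to pop and re-insert at the front; B never sorts: it takes the minimum positive digit directly and assembles the result by counting sort (lead digit, then all zeros, then each digit 1-9 repeated by its count).
import Mathlib
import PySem

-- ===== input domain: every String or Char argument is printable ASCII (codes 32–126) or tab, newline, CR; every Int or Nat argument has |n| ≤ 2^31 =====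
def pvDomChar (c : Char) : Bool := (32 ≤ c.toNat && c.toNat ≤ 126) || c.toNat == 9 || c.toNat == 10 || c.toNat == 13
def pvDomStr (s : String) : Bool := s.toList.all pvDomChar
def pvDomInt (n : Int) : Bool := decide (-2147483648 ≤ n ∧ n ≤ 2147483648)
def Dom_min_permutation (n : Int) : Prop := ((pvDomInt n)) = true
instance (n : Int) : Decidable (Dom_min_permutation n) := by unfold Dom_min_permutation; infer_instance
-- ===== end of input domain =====

-- B replaces A's sort + first-positive scan + pop/insert by a counting-sort style direct
-- assembly (smallest positive digit, then the zeros, then each digit by its count); objective: alternative.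

-- int(x) for a one-character string x (total on the digit characters both programs feed it)
def pvCharVal (c : Char) : Int := (PySem.Int.ofChars? [c]).getD 0

-- ===== PORT A =====
-- 'for number in range(0, len(arr)): if arr[number] > 0: arr.insert(0, arr.pop(number)); break'
def pvALoop (arr : List Int) : List Nat → List Int
  | [] => arr
  | i :: rest =>
    if h : i < arr.length then
      if 0 < arr[i] then
        match PySem.List.pop? arr (i : Int) with
        | some (x, tail) => x :: tail
        | none => arr        -- unreachable: i < arr.length
      else pvALoop arr rest
    else arr                 -- unreachable: every index of range(0, len) is in range

def min_permutation (n : Int) : Int :=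
  let sortedArray := PySem.List.sorted ((PySem.Int.toChars |n|).map (fun x => pvCharVal x)) id
  let arr := pvALoop sortedArray (List.range sortedArray.length)
  let sortedNumber := (arr.map (fun x => PySem.Int.toChars x)).flatten
  -- int(...) never raises here (digit strings); getD 0 is never the default
  if n < 0 then (PySem.Int.ofChars? ('-' :: sortedNumber)).getD 0
  else (PySem.Int.ofChars? sortedNumber).getD 0

-- ===== PORT B =====
def min_permutation_alt (n : Int) : Int :=
  let ds := (PySem.Int.toChars |n|).map (fun c => pvCharVal c)
  let lead := PySem.List.minD (ds.filter (fun d => 0 < d)) id 0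
  if lead = 0 then 0
  else
    let out := (PySem.List.pyRange 1 10 1).foldl
      (fun acc d => acc ++ List.replicate (((PySem.List.count ds d : Int) - (if d = lead then 1 else 0))).toNat d)
      ([lead] ++ List.replicate (PySem.List.count ds 0) 0)
    let body := (out.map (fun x => PySem.Int.toChars x)).flatten
    -- int(...) never raises here (digit strings); getD 0 is never the default
    if n < 0 then (PySem.Int.ofChars? ('-' :: body)).getD 0
    else (PySem.Int.ofChars? body).getD 0

-- ===== PRECONDITION & SPEC =====
def Spec_min_permutation (n : Int) (out : Int) : Prop := out = min_permutation_alt n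
instance (n : Int) (out : Int) : Decidable (Spec_min_permutation n out) := by unfold Spec_min_permutation; infer_instance

-- ===== CLAIM (what is proved, stated in full; the proofs are below) =====
def Claim_equal_min_permutation : Prop := ∀ (n : Int), Dom_min_permutation n → Spec_min_permutation n (min_permutation n)

-- ===== LEMMAS AND PROOFS =====

-- counting-sort expansion: one replicate block per digit of l
def pvBlocks (c : Int → Nat) (l : List Int) : List Int := l.flatMap (fun d => List.replicate (c d) d)

-- first digit of l with a positive count
def pvFirst (c : Int → Nat) : List Int → Option Int
  | [] => none
  | d :: t => if 0 < c d then some d else pvFirst c t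

def pvDigits : List Int := [0, 1, 2, 3, 4, 5, 6, 7, 8, 9]
def pvPos : List Int := [1, 2, 3, 4, 5, 6, 7, 8, 9]

lemma mem_toDigitsCore {f n : Nat} {l : List Char} {c : Char}
    (h : c ∈ Nat.toDigitsCore 10 f n l) : c ∈ l ∨ ∃ k, k ≤ 9 ∧ c = Nat.digitChar k := by
  induction f generalizing n l with
  | zero => simp [Nat.toDigitsCore] at h; exact Or.inl h
  | succ f ih =>
    simp only [Nat.toDigitsCore] at h
    split at h
    · rcases List.mem_cons.mp h with h | h
      · exact Or.inr ⟨n % 10, by omega, h⟩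
      · exact Or.inl h
    · rcases ih h with h | h
      · rcases List.mem_cons.mp h with h | h
        · exact Or.inr ⟨n % 10, by omega, h⟩
        · exact Or.inl h
      · exact Or.inr h

lemma toDigitsCore_pos {f n : Nat} (l : List Char) (hn : n ≠ 0) (hf : n < 10 ^ f) :
    ∃ k, 1 ≤ k ∧ k ≤ 9 ∧ Nat.digitChar k ∈ Nat.toDigitsCore 10 f n l := by
  induction f generalizing n l with
  | zero => simp at hf; omega
  | succ f ih =>
    simp only [Nat.toDigitsCore]
    split
    · rename_i h0
      have h10 : n < 10 := Nat.lt_of_div_eq_zero (by norm_num) h0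
      exact ⟨n, by omega, by omega, by simp [Nat.mod_eq_of_lt h10]⟩
    · rename_i h0
      have h1 : n / 10 < 10 ^ f := by
        rw [Nat.div_lt_iff_lt_mul (by norm_num)]
        calc n < 10 ^ (f+1) := hf
        _ = 10 ^ f * 10 := by ring
      exact ih _ h0 h1


lemma charVal_digitChar {k : Nat} (hk : k ≤ 9) : pvCharVal (Nat.digitChar k) = (k : Int) := by
  interval_cases k <;> decide

lemma toChars_abs (n : Int) : PySem.Int.toChars |n| = Nat.toDigits 10 n.natAbs := by
  have : |n|.toNat = n.natAbs := by
    rw [Int.abs_eq_natAbs]; exact Int.toNat_natCast _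
  simp [PySem.Int.toChars, not_lt.mpr (abs_nonneg n), this]

lemma mem_digits_bounds {n : Int} {d : Int}
    (hd : d ∈ (PySem.Int.toChars |n|).map (fun c => pvCharVal c)) : 0 ≤ d ∧ d ≤ 9 := by
  rw [toChars_abs] at hd
  obtain ⟨c, hc, rfl⟩ := List.mem_map.mp hd
  rcases mem_toDigitsCore hc with h | ⟨k, hk, rfl⟩
  · simp at h
  · rw [charVal_digitChar hk]; omega

lemma digits_pos {n : Int} (hn : n ≠ 0) :
    ∃ d ∈ (PySem.Int.toChars |n|).map (fun c => pvCharVal c), 0 < d ∧ d ≤ 9 := by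
  rw [toChars_abs]
  have hm : n.natAbs ≠ 0 := by simpa using hn
  have hf : n.natAbs < 10 ^ (n.natAbs + 1) := by
    calc n.natAbs < 10 ^ n.natAbs := Nat.lt_pow_self (by norm_num)
    _ ≤ 10 ^ (n.natAbs + 1) := Nat.pow_le_pow_right (by norm_num) (by omega)
  obtain ⟨k, hk1, hk2, hk3⟩ := toDigitsCore_pos [] hm hf
  exact ⟨(k : Int), List.mem_map.mpr ⟨_, hk3, charVal_digitChar hk2⟩, by omega, by omega⟩

lemma pvBlocks_mem {c : Int → Nat} {l : List Int} {x : Int} (h : x ∈ pvBlocks c l) : x ∈ l := by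
  simp only [pvBlocks, List.mem_flatMap] at h
  obtain ⟨d, hd, hx⟩ := h
  rw [List.eq_of_mem_replicate hx]; exact hd

lemma pvBlocks_pairwise {c : Int → Nat} {l : List Int} (h : l.Pairwise (· ≤ ·)) :
    (pvBlocks c l).Pairwise (· ≤ ·) := by
  induction l with
  | nil => simp [pvBlocks]
  | cons d t ih =>
    rcases List.pairwise_cons.mp h with ⟨hd, ht⟩
    simp only [pvBlocks, List.flatMap_cons]
    rw [List.pairwise_append]
    refine ⟨List.pairwise_replicate.mpr (by simp), ih ht, ?_⟩
    intro x hx y hy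
    rw [List.eq_of_mem_replicate hx]
    exact hd y (pvBlocks_mem hy)

lemma pvBlocks_count {c : Int → Nat} {l : List Int} (hl : l.Nodup) (x : Int) :
    (pvBlocks c l).count x = if x ∈ l then c x else 0 := by
  induction l with
  | nil => simp [pvBlocks]
  | cons d t ih =>
    rcases List.nodup_cons.mp hl with ⟨hd, ht⟩
    simp only [pvBlocks, List.flatMap_cons, List.count_append, List.count_replicate]
    rw [show (List.flatMap (fun d => List.replicate (c d) d) t) = pvBlocks c t from rfl, ih ht]
    by_cases hxd : x = d
    · subst hxd; simp [hd]
    · simp [hxd, Ne.symm hxd, List.mem_cons]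

lemma pvBlocks_congr {c c' : Int → Nat} {l : List Int} (h : ∀ x ∈ l, c x = c' x) :
    pvBlocks c l = pvBlocks c' l := by
  unfold pvBlocks
  induction l with
  | nil => rfl
  | cons d t ih =>
    simp only [List.flatMap_cons]
    rw [h d (List.mem_cons_self ..),
      ih (fun x hx => h x (List.mem_cons_of_mem _ hx))]

lemma pvBlocks_perm {m : List Int} (hb : ∀ d ∈ m, 0 ≤ d ∧ d ≤ 9) :
    m.Perm (pvBlocks (fun d => m.count d) pvDigits) := by
  rw [List.perm_iff_count]
  intro a
  rw [pvBlocks_count (by decide) a]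
  by_cases ha : a ∈ pvDigits
  · simp [ha]
  · have : a ∉ m := fun hm => ha (by
      have := hb a hm
      simp only [pvDigits, List.mem_cons]
      omega)
    simp [ha, List.count_eq_zero.mpr this]

lemma sorted_eq_blocks {m : List Int} (hb : ∀ d ∈ m, 0 ≤ d ∧ d ≤ 9) :
    PySem.List.sorted m id = pvBlocks (fun d => m.count d) pvDigits := by
  exact List.Perm.eq_of_pairwise (fun a b _ _ h1 h2 => le_antisymm h1 h2)
    (PySem.List.sorted_pairwise m id) (pvBlocks_pairwise (by decide))
    ((PySem.List.sorted_perm m id false).trans (pvBlocks_perm hb))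

lemma pvFirst_mem {c : Int → Nat} {l : List Int} {d : Int} (h : pvFirst c l = some d) :
    d ∈ l ∧ 0 < c d := by
  induction l with
  | nil => simp [pvFirst] at h
  | cons e t ih =>
    simp only [pvFirst] at h
    split at h
    · cases h; exact ⟨List.mem_cons_self .., by assumption⟩
    · exact ⟨List.mem_cons_of_mem _ (ih h).1, (ih h).2⟩

lemma pvFirst_min {c : Int → Nat} {l : List Int} {d : Int} (hl : l.Pairwise (· ≤ ·))
    (h : pvFirst c l = some d) : ∀ e ∈ l, 0 < c e → d ≤ e := by
  induction l with
  | nil => simp [pvFirst] at h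
  | cons x t ih =>
    rcases List.pairwise_cons.mp hl with ⟨hx, ht⟩
    simp only [pvFirst] at h
    intro e he hce
    split at h
    · cases h
      rcases List.mem_cons.mp he with rfl | he
      · exact le_refl _
      · exact hx e he
    · rcases List.mem_cons.mp he with rfl | he
      · rename_i hc0; omega
      · exact ih ht h e he hce

lemma pvFirst_isSome {c : Int → Nat} {l : List Int} {e : Int} (he : e ∈ l) (hc : 0 < c e) :
    (pvFirst c l).isSome := by
  induction l with
  | nil => simp at he
  | cons x t ih =>
    simp only [pvFirst]
    split
    · rfl
    · rcases List.mem_cons.mp he with rfl | he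
      · rename_i h; omega
      · exact ih he

lemma pvFirst_blocks {c : Int → Nat} {l : List Int} {d : Int} (hl : l.Nodup)
    (h : pvFirst c l = some d) :
    pvBlocks c l = d :: pvBlocks (fun x => if x = d then c x - 1 else c x) l := by
  induction l with
  | nil => simp [pvFirst] at h
  | cons e t ih =>
    rcases List.nodup_cons.mp hl with ⟨het, ht⟩
    simp only [pvFirst] at h
    simp only [pvBlocks, List.flatMap_cons]
    split at h
    · rename_i hce
      injection h with h
      subst h
      have hrep : List.replicate (c e) e = e :: List.replicate (c e - 1) e := by
        rw [← List.replicate_succ]; congr 1; omega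
      have h2 : pvBlocks (fun x => if x = e then c x - 1 else c x) t = pvBlocks c t :=
        pvBlocks_congr (fun x hx => by simp [show x ≠ e from fun k => het (k ▸ hx)])
      rw [hrep]
      simp only [List.cons_append, List.cons.injEq, if_true, true_and]
      rw [show (List.flatMap (fun x => List.replicate (if x = e then c x - 1 else c x) x) t)
          = pvBlocks (fun x => if x = e then c x - 1 else c x) t from rfl, h2]
      rfl
    · rename_i hce
      have hde : d ∈ t := (pvFirst_mem h).1
      have hne : e ≠ d := fun hed => het (hed ▸ hde)
      have hc0 : c e = 0 := by omega
      rw [hc0]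
      simp only [List.replicate_zero, List.nil_append]
      rw [show (List.flatMap (fun x => List.replicate (c x) x) t) = pvBlocks c t from rfl, ih ht h]
      simp only [List.cons.injEq, true_and]
      rw [show (List.flatMap (fun x => List.replicate (if x = d then c x - 1 else c x) x) t)
          = pvBlocks (fun x => if x = d then c x - 1 else c x) t from rfl]
      simp [hne]

lemma pvALoop_eq {pre post : List Int} {x : Int} (hpre : ∀ y ∈ pre, y ≤ 0) (hx : 0 < x) :
    ∀ (k i : Nat), i ≤ pre.length → i + k = (pre ++ x :: post).length →
    pvALoop (pre ++ x :: post) (List.range' i k) = x :: (pre ++ post) := by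
  intro k
  induction k with
  | zero => intro i hi hk; simp at hk; omega
  | succ k ih =>
    intro i hi hk
    have hlen : i < (pre ++ x :: post).length := by simp at hk ⊢; omega
    rw [List.range'_succ, pvALoop, dif_pos hlen]
    by_cases hip : i < pre.length
    · have he : (pre ++ x :: post)[i] = pre[i] := List.getElem_append_left hip
      rw [he, if_neg (not_lt.mpr (hpre _ (List.getElem_mem hip)))]
      exact ih (i + 1) (by omega) (by omega)
    · have hie : i = pre.length := by omega
      subst hie
      have he : (pre ++ x :: post)[pre.length] = x := by
        rw [List.getElem_append_right (le_refl _)]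
        simp
      rw [he, if_pos hx]
      have hpop : PySem.List.pop? (pre ++ x :: post) (pre.length : Int) = some (x, pre ++ post) := by
        simp [PySem.List.pop?, PySem.List.pyIdx?]
        rw [List.eraseIdx_append_of_length_le (le_refl _)]
        simp
      rw [hpop]

lemma pvFlatMap_congr {f g : Int → List Int} : ∀ {l : List Int},
    (∀ x ∈ l, f x = g x) → l.flatMap f = l.flatMap g
  | [], _ => rfl
  | d :: t, h => by
    simp only [List.flatMap_cons]
    rw [h d (List.mem_cons_self ..), pvFlatMap_congr (fun x hx => h x (List.mem_cons_of_mem _ hx))]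

lemma pvMinD_eq {l : List Int} {x : Int} (hx : x ∈ l) (hmin : ∀ y ∈ l, x ≤ y) :
    PySem.List.minD l id 0 = x := by
  have hne : l ≠ [] := List.ne_nil_of_mem hx
  obtain ⟨m, hm⟩ : ∃ m, PySem.List.min? l id = some m := by
    cases h : PySem.List.min? l id with
    | none => exact absurd ((PySem.List.min?_eq_none_iff l id).mp h) hne
    | some m => exact ⟨m, rfl⟩
  have hmem : m ∈ l := PySem.List.min?_mem hm
  have hle : m ≤ x := PySem.List.min?_isMin hm x hx
  simp [PySem.List.minD, hm, le_antisymm hle (hmin m hmem)]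

theorem min_permutation_spec : Claim_equal_min_permutation := by
  intro n _
  unfold Spec_min_permutation
  by_cases hn : n = 0
  · subst hn; decide
  -- notation
  set m : List Int := (PySem.Int.toChars |n|).map (fun c => pvCharVal c) with hm
  set c : Int → Nat := fun d => m.count d with hc
  have hb : ∀ d ∈ m, 0 ≤ d ∧ d ≤ 9 := fun d hd => mem_digits_bounds hd
  obtain ⟨p, hpm, hp0, hp9⟩ := digits_pos hn
  have hppos : p ∈ pvPos := by simp only [pvPos, List.mem_cons]; omega
  have hcp : 0 < c p := List.count_pos_iff.mpr hpm
  obtain ⟨lead, hfirst⟩ := Option.isSome_iff_exists.mp (pvFirst_isSome hppos hcp)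
  obtain ⟨hleadmem, hleadpos⟩ := pvFirst_mem hfirst
  have hlead19 : 1 ≤ lead ∧ lead ≤ 9 := by
    have : lead = 1 ∨ lead = 2 ∨ lead = 3 ∨ lead = 4 ∨ lead = 5 ∨ lead = 6 ∨ lead = 7 ∨
        lead = 8 ∨ lead = 9 := by simpa [pvPos] using hleadmem
    omega
  have hleadm : lead ∈ m := List.count_pos_iff.mp hleadpos
  set c' : Int → Nat := fun x => if x = lead then c x - 1 else c x with hc'
  -- the sorted list, decomposed
  have hsorted : PySem.List.sorted m id = List.replicate (c 0) 0 ++ (lead :: pvBlocks c' pvPos) := by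
    rw [sorted_eq_blocks hb]
    have : pvBlocks c pvDigits = List.replicate (c 0) 0 ++ pvBlocks c pvPos := by
      simp [pvBlocks, pvDigits, pvPos]
    rw [this, pvFirst_blocks (by decide) hfirst]
  -- A's loop moves lead to the front
  have hA : pvALoop (PySem.List.sorted m id) (List.range (PySem.List.sorted m id).length) =
      lead :: (List.replicate (c 0) 0 ++ pvBlocks c' pvPos) := by
    rw [hsorted, List.range_eq_range']
    exact pvALoop_eq (fun y hy => le_of_eq (List.eq_of_mem_replicate hy))
      (by omega) _ 0 (Nat.zero_le _) (by simp)
  -- B's lead is the same digit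
  have hBlead : PySem.List.minD (m.filter (fun d => 0 < d)) id 0 = lead := by
    apply pvMinD_eq
    · exact List.mem_filter.mpr ⟨hleadm, by simp; omega⟩
    · intro y hy
      obtain ⟨hym, hypos⟩ := List.mem_filter.mp hy
      have hy9 := (hb y hym).2
      have hy0 : 0 < y := by simpa using hypos
      exact pvFirst_min (by decide) hfirst y (by simp only [pvPos, List.mem_cons]; omega)
        (List.count_pos_iff.mpr hym)
  -- B's assembled list is A's list
  have hBout : (PySem.List.pyRange 1 10 1).foldl
      (fun acc d => acc ++ List.replicate
        (((PySem.List.count m d : Int) - (if d = lead then 1 else 0))).toNat d)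
      ([lead] ++ List.replicate (PySem.List.count m 0) 0)
      = lead :: (List.replicate (c 0) 0 ++ pvBlocks c' pvPos) := by
    have hrange : PySem.List.pyRange 1 10 1 = pvPos := by decide
    rw [hrange, PySem.List.foldl_append_eq_flatMap]
    have hfun : (pvPos.flatMap (fun d => List.replicate
        (((PySem.List.count m d : Int) - (if d = lead then 1 else 0))).toNat d))
        = pvBlocks c' pvPos := by
      refine pvFlatMap_congr (fun d hd => ?_)
      by_cases hdl : d = lead
      · subst hdl
        have hcl : 0 < List.count d m := hleadpos
        simp only [if_pos rfl, PySem.List.count, hc', hc]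
        congr 1
        rw [if_pos trivial]
        omega
      · simp only [if_neg hdl, PySem.List.count, hc', hc]
        congr 1
    rw [hfun]
    simp [PySem.List.count, hc]
  -- assemble
  have hne0 : lead ≠ 0 := by omega
  simp only [min_permutation, min_permutation_alt]
  rw [← hm, hA, hBlead, if_neg hne0, hBout]
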